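-- pv_equiv track=rewrite | github.com/JawadKotaichh/Codeforces | Divisions/Div 2/Div 2 978/B_KarSalesman.py | Karl
-- ===== SOURCE A (Python) =====
-- def update_list(L, x):
--     sublist = L[-x:]
--     min_value = min(sublist)
--
--     new_sublist = [elem - min_value for elem in sublist]
--     updated_sublist = [elem for elem in new_sublist if elem > 0]
--     updated_list = L[:-x] + updated_sublist
--     return updated_list
--
-- def Karl(numberOfModels,x,numOfCarsPerModel):
--     minPeople=0
--     while len(numOfCarsPerModel)>0:
--         numOfCarsPerModel.sort()
--         if len(numOfCarsPerModel)>=x: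
--
--             minPeople+=numOfCarsPerModel[-x]
--             numOfCarsPerModel=update_list(numOfCarsPerModel,x)
--         else:
--             minPeople+=numOfCarsPerModel[0]
--             numOfCarsPerModel=update_list(numOfCarsPerModel,len(numOfCarsPerModel))
--
--     return minPeople
-- ===== SOURCE B (Python) =====
-- # B: sort once, then per round merge the two already-sorted runs instead of
-- # re-sorting the whole list each iteration; unified k = min(x, len) replaces
-- # A's two branches. (Return value only: A sorts its list argument in place, B does not.)
-- def _merge(p, q):
--     r = []
--     i = j = 0
--     while i < len(p) and j < len(q):
--         if q[j] < p[i]: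
--             r.append(q[j]); j += 1
--         else:
--             r.append(p[i]); i += 1
--     r.extend(p[i:])
--     r.extend(q[j:])
--     return r
--
-- def Karl(numberOfModels, x, numOfCarsPerModel):
--     a = sorted(numOfCarsPerModel)
--     total = 0
--     while a:
--         k = min(x, len(a))
--         pos = len(a) - k
--         v = a[pos]
--         prefix = a[:pos]
--         shifted = [e - v for e in a[pos:] if e > v]
--         a = _merge(prefix, shifted)
--         total += v
--     return total
-- ===== Notes on version B (the rewrite author's own statement) =====
-- stated objective: alternative
-- what changed: B sorts once and keeps the worklist sorted by merging the two sorted runs each round (prefix + shifted suffix) with a unified k = min(x, len) step, instead of A's re-sort of the whole list at the top of every iteration with two separate branches.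
-- outside the precondition, e.g. on Karl(1, 0, [2, 3]): A returns 3, B raises IndexError
import Mathlib
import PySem

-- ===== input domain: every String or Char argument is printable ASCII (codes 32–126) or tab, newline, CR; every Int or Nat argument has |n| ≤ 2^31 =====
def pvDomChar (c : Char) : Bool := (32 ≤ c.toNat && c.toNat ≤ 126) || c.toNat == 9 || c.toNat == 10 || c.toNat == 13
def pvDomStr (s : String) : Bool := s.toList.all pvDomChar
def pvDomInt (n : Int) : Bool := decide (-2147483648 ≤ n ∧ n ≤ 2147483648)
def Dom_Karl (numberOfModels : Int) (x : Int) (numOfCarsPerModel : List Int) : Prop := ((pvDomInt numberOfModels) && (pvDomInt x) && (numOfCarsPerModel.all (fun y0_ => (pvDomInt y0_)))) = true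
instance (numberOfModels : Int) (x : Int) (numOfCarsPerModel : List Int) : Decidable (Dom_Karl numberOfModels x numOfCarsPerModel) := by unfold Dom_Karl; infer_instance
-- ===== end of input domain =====

-- B sorts once and keeps the worklist sorted by merging per round, instead of A's
-- re-sort at the top of every iteration (alternative decomposition, no speed claim).
-- Return value only: Python A sorts its list argument in place; B does not mutate it.

-- ===== PORT A =====
def pvUpdateList (L : List Int) (x : Int) : List Int :=
  let sublist := PySem.List.slice L (some (-x)) none
  -- min(sublist); the .getD 0 default is reached only outside Pre_ (empty sublist = ValueError)
  let minValue := (PySem.List.min? sublist (fun y => y)).getD 0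
  let newSublist := sublist.map (fun e => e - minValue)
  let updatedSublist := newSublist.filter (fun e => decide (e > 0))
  PySem.List.slice L none (some (-x)) ++ updatedSublist

-- the while-loop; fuel (length + 1) suffices on Pre_: every round drops ≥ 1 element
def KarlLoop : Nat → Int → List Int → Int → Int
  | 0, _, _, acc => acc
  | fuel + 1, x, L, acc =>
    if 0 < L.length then
      let Ls := PySem.List.sorted L (fun y => y)
      if x ≤ (Ls.length : Int) then
        KarlLoop fuel x (pvUpdateList Ls x) (acc + PySem.List.pyGetD Ls (-x) 0)
      else
        KarlLoop fuel x (pvUpdateList Ls (Ls.length : Int)) (acc + PySem.List.pyGetD Ls 0 0)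
    else acc

def Karl (numberOfModels : Int) (x : Int) (numOfCarsPerModel : List Int) : Int :=
  KarlLoop (numOfCarsPerModel.length + 1) x numOfCarsPerModel 0

-- ===== PORT B =====
-- Source B's hand-written two-pointer merge of two sorted lists
def pvMerge : List Int → List Int → List Int
  | [], q => q
  | p, [] => p
  | a :: p, b :: q => if b < a then b :: pvMerge (a :: p) q else a :: pvMerge p (b :: q)
termination_by p q => p.length + q.length

-- Source B's while-loop; fuel (length + 1) suffices on Pre_: every round drops ≥ 1 element
def KarlAltLoop : Nat → Int → List Int → Int → Int
  | 0, _, _, acc => acc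
  | fuel + 1, x, a, acc =>
    if a = [] then acc
    else
      let k := min x (a.length : Int)
      let pos := (a.length : Int) - k
      let v := PySem.List.pyGetD a pos 0
      let pre := PySem.List.slice a none (some pos)
      let shifted := ((PySem.List.slice a (some pos) none).filter (fun e => decide (e > v))).map (fun e => e - v)
      KarlAltLoop fuel x (pvMerge pre shifted) (acc + v)

def Karl_alt (numberOfModels : Int) (x : Int) (numOfCarsPerModel : List Int) : Int :=
  KarlAltLoop (numOfCarsPerModel.length + 1) x (PySem.List.sorted numOfCarsPerModel (fun y => y)) 0

-- ===== PRECONDITION & SPEC =====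
-- Pre_ excludes x ≤ 0 (with a nonempty list): for x < 0 the Python A always ends in an
-- IndexError/ValueError; for x = 0 A returns (a degenerate 'each buys 0 cars' corner) but
-- B's natural uniform indexing a[len(a)-min(x,len(a))] raises IndexError there (cited in claim.json).
def Pre_Karl (numberOfModels : Int) (x : Int) (numOfCarsPerModel : List Int) : Prop :=
  1 ≤ x ∨ numOfCarsPerModel = []
instance (numberOfModels : Int) (x : Int) (numOfCarsPerModel : List Int) : Decidable (Pre_Karl numberOfModels x numOfCarsPerModel) := by unfold Pre_Karl; infer_instance

def pvWitness_Karl : Int × Int × List Int := (3, 2, [3, 3, 4])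

def Spec_Karl (numberOfModels : Int) (x : Int) (numOfCarsPerModel : List Int) (out : Int) : Prop := out = Karl_alt numberOfModels x numOfCarsPerModel
instance (numberOfModels : Int) (x : Int) (numOfCarsPerModel : List Int) (out : Int) : Decidable (Spec_Karl numberOfModels x numOfCarsPerModel out) := by unfold Spec_Karl; infer_instance

-- ===== CLAIM (what is proved, stated in full; the proofs are below) =====
def Claim_equal_Karl : Prop := ∀ (numberOfModels : Int) (x : Int) (numOfCarsPerModel : List Int), Dom_Karl numberOfModels x numOfCarsPerModel → Pre_Karl numberOfModels x numOfCarsPerModel → Spec_Karl numberOfModels x numOfCarsPerModel (Karl numberOfModels x numOfCarsPerModel)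

-- ===== LEMMAS AND PROOFS =====

theorem pvMerge_eq_merge (p q : List Int) :
    pvMerge p q = List.merge p q (fun a b => decide (a ≤ b)) := by
  fun_induction pvMerge p q with
  | case1 q => simp
  | case2 a p => simp
  | case3 a p b q h ih =>
    have hab : ¬ (a ≤ b) := by omega
    simp [hab, ih]
  | case4 a p b q h ih =>
    have hab : a ≤ b := by omega
    simp [hab, ih]

theorem pvMerge_perm (p q : List Int) : (pvMerge p q).Perm (p ++ q) := by
  rw [pvMerge_eq_merge]
  exact List.merge_perm_append ..

theorem pvMerge_pairwise {p q : List Int} (hp : p.Pairwise (· ≤ ·)) (hq : q.Pairwise (· ≤ ·)) :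
    (pvMerge p q).Pairwise (· ≤ ·) := by
  rw [pvMerge_eq_merge]
  exact List.Pairwise.merge hp hq

-- sorted(p ++ q) is the merge, when p and q are each sorted
theorem sorted_append_eq_pvMerge {p q : List Int} (hp : p.Pairwise (· ≤ ·)) (hq : q.Pairwise (· ≤ ·)) :
    PySem.List.sorted (p ++ q) (fun y => y) = pvMerge p q := by
  exact PySem.List.sorted_id_eq_of_perm_of_pairwise (p ++ q) (pvMerge p q)
    (pvMerge_perm p q) (pvMerge_pairwise hp hq)

theorem foldl_min_of_le {t : List Int} {v : Int} (h : ∀ y ∈ t, v ≤ y) : t.foldl min v = v := by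
  induction t with
  | nil => rfl
  | cons y t ih =>
    simp only [List.foldl_cons]
    rw [min_eq_left (h y (by simp))]
    exact ih (fun z hz => h z (by simp [hz]))

-- min of a sorted nonempty list is its head
theorem min_sorted_head {v : Int} {t : List Int} (h : (v :: t).Pairwise (· ≤ ·)) :
    PySem.List.min? (v :: t) (fun y => y) = some v := by
  rw [PySem.List.min?_id_cons]
  rw [foldl_min_of_le (List.pairwise_cons.mp h).1]

theorem filter_pos_map_sub {l : List Int} {v : Int} :
    (l.map (fun e => e - v)).filter (fun e => decide (e > 0)) =
    (l.filter (fun e => decide (e > v))).map (fun e => e - v) := by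
  rw [List.filter_map]
  congr 1
  apply List.filter_congr
  intro e he
  simp only [Function.comp_apply, decide_eq_decide]
  omega

-- one round of A's update on an already-sorted list, for 1 ≤ k ≤ |S|
theorem pvUpdateList_eq {S : List Int} (hs : S.Pairwise (· ≤ ·)) {k : Nat}
    (hk1 : 1 ≤ k) (_hk2 : k ≤ S.length) {v : Int} {t : List Int}
    (hd : S.drop (S.length - k) = v :: t) :
    pvUpdateList S (k : Int) =
      S.take (S.length - k) ++ ((v :: t).map (fun e => e - v)).filter (fun e => decide (e > 0)) := by
  have h0 : 0 < k := hk1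
  have hpt : (v :: t).Pairwise (· ≤ ·) := by
    rw [← hd]; exact List.Pairwise.sublist (List.drop_sublist _ _) hs
  simp only [pvUpdateList]
  rw [PySem.List.slice_from_neg_natCast S k h0, PySem.List.slice_to_neg_natCast S k h0, hd,
    min_sorted_head hpt]
  rfl


-- one common round: A's update-then-resort equals B's merge step (k = min(x, len) as a Nat)
theorem step_eq (x : Int) (fuel : Nat) (acc : Int) (S : List Int)
    (hpair : S.Pairwise (· ≤ ·)) (k : Nat) (hk1 : 1 ≤ k) (hk2 : k ≤ S.length)
    (v : Int) (t : List Int) (hd : S.drop (S.length - k) = v :: t)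
    (IH : ∀ (L : List Int) (acc : Int),
      KarlLoop fuel x L acc = KarlAltLoop fuel x (PySem.List.sorted L (fun y => y)) acc) :
    KarlLoop fuel x (pvUpdateList S (k : Int)) (acc + v) =
      KarlAltLoop fuel x
        (pvMerge (S.take (S.length - k))
          (((S.drop (S.length - k)).filter (fun e => decide (e > v))).map (fun e => e - v)))
        (acc + v) := by
  have htake : (S.take (S.length - k)).Pairwise (· ≤ ·) :=
    List.Pairwise.sublist (List.take_sublist _ _) hpair
  have hdrop : (v :: t).Pairwise (· ≤ ·) := by
    rw [← hd]; exact List.Pairwise.sublist (List.drop_sublist _ _) hpair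
  have hfil : ((v :: t).filter (fun e => decide (e > v))).Pairwise (· ≤ ·) :=
    List.Pairwise.sublist List.filter_sublist hdrop
  have hshift : (((v :: t).filter (fun e => decide (e > v))).map (fun e => e - v)).Pairwise (· ≤ ·) :=
    List.pairwise_map.mpr (hfil.imp (fun h => by omega))
  rw [IH, pvUpdateList_eq hpair hk1 hk2 hd, filter_pos_map_sub, hd,
    sorted_append_eq_pvMerge htake hshift]

theorem loop_eq (x : Int) (hx : 1 ≤ x) :
    ∀ (fuel : Nat) (L : List Int) (acc : Int),
      KarlLoop fuel x L acc = KarlAltLoop fuel x (PySem.List.sorted L (fun y => y)) acc := by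
  intro fuel
  induction fuel with
  | zero => intro L acc; rfl
  | succ fuel ih =>
    intro L acc
    by_cases hL : L = []
    · have hnil : PySem.List.sorted L (fun y => y) = [] := by
        subst hL; rfl
      subst hL
      simp [KarlLoop, KarlAltLoop, hnil]
    · have hnil : PySem.List.sorted L (fun y => y) ≠ [] := by
        simpa [PySem.List.sorted_eq_nil_iff] using hL
      have hlen : (PySem.List.sorted L (fun y => y)).length = L.length :=
        PySem.List.length_sorted L (fun y => y) false
      have hpos : 0 < L.length := List.length_pos_iff.mpr hL
      have hpair : (PySem.List.sorted L (fun y => y)).Pairwise (· ≤ ·) :=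
        PySem.List.sorted_pairwise L (fun y => y)
      set Ls := PySem.List.sorted L (fun y => y) with hLsdef
      set n := Ls.length with hn
      have hnpos : 0 < n := by omega
      by_cases hb : x ≤ (n : Int)
      · -- len >= x branch; k = x.toNat
        set k := x.toNat with hk
        have hkx : (k : Int) = x := Int.toNat_of_nonneg (by omega)
        have hk1 : 1 ≤ k := by omega
        have hk2 : k ≤ n := by omega
        have hlt : n - k < n := by omega
        have hd : Ls.drop (n - k) = Ls[n - k] :: Ls.drop (n - k + 1) :=
          List.drop_eq_getElem_cons hlt
        have hvA : PySem.List.pyGetD Ls (-x) 0 = Ls[n - k] := by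
          rw [← hkx]
          rw [PySem.List.pyGetD_neg_natCast Ls k 0 hk1 hk2]
        have hstep := step_eq x fuel acc Ls hpair k hk1 hk2 Ls[n - k] _ hd ih
        have hA : KarlLoop (fuel + 1) x L acc =
            KarlLoop fuel x (pvUpdateList Ls ((k : Nat) : Int)) (acc + Ls[n - k]) := by
          simp only [KarlLoop]
          rw [if_pos hpos, ← hLsdef, ← hn, if_pos hb, hvA, hkx]
        have hB : KarlAltLoop (fuel + 1) x Ls acc =
            KarlAltLoop fuel x
              (pvMerge (Ls.take (n - k))
                (((Ls.drop (n - k)).filter (fun e => decide (e > Ls[n - k]))).map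
                  (fun e => e - Ls[n - k])))
              (acc + Ls[n - k]) := by
          simp only [KarlAltLoop]
          rw [if_neg hnil, ← hn]
          have hmin : min x (n : Int) = ((k : Nat) : Int) := by rw [hkx]; omega
          have hposcast : (n : Int) - ((k : Nat) : Int) = (((n - k : Nat) : Nat) : Int) := by
            omega
          rw [hmin, hposcast]
          rw [PySem.List.slice_to_natCast, PySem.List.slice_from_natCast]
          have hv : PySem.List.pyGetD Ls (((n - k : Nat) : Nat) : Int) 0 = Ls[n - k] := by
            rw [PySem.List.pyGetD_natCast]
            exact List.getD_eq_getElem Ls 0 hlt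
          rw [hv]
        rw [hA, hstep, ← hB]
      · -- len < x branch; k = n
        have hd : Ls.drop (n - n) = Ls[0] :: Ls.drop 1 := by
          simpa using List.drop_eq_getElem_cons (by omega : 0 < Ls.length)
        have hstep := step_eq x fuel acc Ls hpair n (by omega) le_rfl Ls[0]
          (Ls.drop 1) hd ih
        have hvA : PySem.List.pyGetD Ls 0 0 = Ls[0] := by
          rw [PySem.List.pyGetD_zero]
          exact List.getD_eq_getElem Ls 0 (by omega)
        have hA : KarlLoop (fuel + 1) x L acc =
            KarlLoop fuel x (pvUpdateList Ls (n : Int)) (acc + Ls[0]) := by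
          simp only [KarlLoop]
          rw [if_pos hpos, ← hLsdef, ← hn, if_neg hb, hvA]
        have hB : KarlAltLoop (fuel + 1) x Ls acc =
            KarlAltLoop fuel x
              (pvMerge (Ls.take (n - n))
                (((Ls.drop (n - n)).filter (fun e => decide (e > Ls[0]))).map
                  (fun e => e - Ls[0])))
              (acc + Ls[0]) := by
          simp only [KarlAltLoop]
          rw [if_neg hnil, ← hn]
          have hmin : min x (n : Int) = (n : Int) := by omega
          have hposcast : (n : Int) - (n : Int) = ((0 : Nat) : Int) := by omega
          rw [hmin, hposcast]
          rw [PySem.List.slice_to_natCast, PySem.List.slice_from_natCast]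
          have hv : PySem.List.pyGetD Ls ((0 : Nat) : Int) 0 = Ls[0] := by
            rw [PySem.List.pyGetD_natCast]
            exact List.getD_eq_getElem Ls 0 (by omega)
          rw [hv]
          simp
        rw [hA, hstep, ← hB]

-- ===== VERDICT (by name: the statement is the Claim_ definition above) =====
theorem Karl_spec : Claim_equal_Karl := by
  intro numberOfModels x L _ hpre
  unfold Spec_Karl Karl Karl_alt
  rcases hpre with hx | hL
  · rw [loop_eq x hx]
  · subst hL; rfl
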